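-- pv_equiv track=rewrite | github.com/pypi-data/pypi-mirror-91 | packages/scierra/scierra-0.6.tar.gz/scierra-0.6/scierra/utils/utils.py | str_equal
-- ===== SOURCE A (Python) =====
-- WHITESPACES = [' ', '\r', '\t', '\n']
--
-- def str_equal(str, segments, idx):
--     l = len(segments)
--     if idx is None:
--         return False
--     if l == 1:
--         str_len = len(segments[0])
--         return str[idx:idx+str_len] == segments[0]
--     else:
--         str_len = len(segments[0])
--         if str[idx:idx+str_len] != segments[0]:
--             return False
--         return str_equal(str, segments[1:], cross_whitespaces(str, idx+str_len-1))
--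
-- def cross_whitespaces(str, index):
--     i = index + 1
--     if i == len(str):
--         return None
--     while str[i] in WHITESPACES:
--         i += 1
--         if i == len(str):
--             return None
--
--     return i
-- ===== SOURCE B (Python) =====
-- WHITESPACES = [' ', '\r', '\t', '\n']
--
-- def cross_whitespaces(str, index):
--     i = index + 1
--     if i == len(str):
--         return None
--     while str[i] in WHITESPACES:
--         i += 1
--         if i == len(str):
--             return None
--
--     return i
--
-- def str_equal(str, segments, idx):
--     for seg in segments[:-1]:
--         if idx is None:
--             return False
--         if str[idx:idx+len(seg)] != seg:
--             return False
--         idx = cross_whitespaces(str, idx + len(seg) - 1)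
--     if idx is None:
--         return False
--     last = segments[-1]
--     return str[idx:idx+len(last)] == last
-- ===== Notes on version B (the rewrite author's own statement) =====
-- stated objective: simpler
-- what changed: Replaces A's tail recursion with per-step list slicing of segments by a single for-loop over segments[:-1] with idx as an accumulator and the last segment compared once after the loop.
import Mathlib
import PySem

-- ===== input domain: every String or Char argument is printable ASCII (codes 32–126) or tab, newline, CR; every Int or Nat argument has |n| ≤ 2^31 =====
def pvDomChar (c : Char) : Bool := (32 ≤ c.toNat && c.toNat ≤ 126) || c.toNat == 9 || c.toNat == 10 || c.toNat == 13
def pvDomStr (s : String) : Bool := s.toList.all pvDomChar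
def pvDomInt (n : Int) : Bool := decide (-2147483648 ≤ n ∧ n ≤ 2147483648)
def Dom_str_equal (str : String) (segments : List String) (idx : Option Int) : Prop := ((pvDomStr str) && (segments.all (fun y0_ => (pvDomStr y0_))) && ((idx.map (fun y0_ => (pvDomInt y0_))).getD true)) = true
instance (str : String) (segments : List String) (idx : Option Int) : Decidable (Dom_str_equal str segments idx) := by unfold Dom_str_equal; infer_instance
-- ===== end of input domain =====

-- B replaces A's tail recursion (which slices the segments list each step) by one
-- for-loop over segments[:-1] with idx as accumulator (idx checked for None first,
-- as in A) and the last segment compared once after the loop; same return value on Pre_.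

-- ===== PORT A =====
def pvWS : List Char := [' ', '\r', '\t', '\n']

-- the 'while str[i] in WHITESPACES' loop of cross_whitespaces (both checks of i == len(str) fold into the head test)
def crossGo (s : List Char) (i : Int) : Option Int :=
  if i = (s.length : Int) then none
  else
    match hg : PySem.List.pyGet? s i with
    | none => none   -- Python raises IndexError here (such inputs are outside Pre_)
    | some c => if c ∈ pvWS then crossGo s (i + 1) else some i
termination_by ((s.length : Int) - i).toNat
decreasing_by
  have h2 : PySem.List.pyGet? s i ≠ none := by simp [hg]
  have h3 : PySem.Raise.InRange s.length i := by
    by_contra hc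
    exact h2 ((PySem.List.pyGet?_eq_none_iff (xs := s) (i := i)).mpr hc)
  simp [PySem.Raise.InRange] at h3
  omega

def crossWhitespaces (s : List Char) (index : Int) : Option Int :=
  crossGo s (index + 1)

def str_equal (str : String) (segments : List String) (idx : Option Int) : Bool :=
  match idx with
  | none => false
  | some i =>
    match segments with
    | [] => false   -- Python raises IndexError on segments[0] (outside Pre_)
    | seg :: rest =>
      let sl : Int := (seg.toList.length : Int)
      if rest = [] then
        PySem.List.slice str.toList (some i) (some (i + sl)) == seg.toList
      else if PySem.List.slice str.toList (some i) (some (i + sl)) ≠ seg.toList then false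
      else str_equal str rest (crossWhitespaces str.toList (i + sl - 1))

-- ===== PORT B =====
-- the for-loop over segments[:-1]: none = an early 'return False', some idx' = loop finished
def bLoop (s : List Char) (segs : List String) (idx : Option Int) : Option (Option Int) :=
  match segs with
  | [] => some idx
  | seg :: rest =>
    match idx with
    | none => none
    | some i =>
      if PySem.List.slice s (some i) (some (i + (seg.toList.length : Int))) ≠ seg.toList then none
      else bLoop s rest (crossWhitespaces s (i + (seg.toList.length : Int) - 1))

def str_equal_alt (str : String) (segments : List String) (idx : Option Int) : Bool :=
  match bLoop str.toList segments.dropLast idx with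
  | none => false
  | some none => false   -- the 'if idx is None: return False' after the loop
  | some (some i) =>
    match segments.getLast? with
    | none => false   -- Python raises IndexError on segments[-1] (outside Pre_)
    | some last =>
      PySem.List.slice str.toList (some i) (some (i + (last.toList.length : Int))) == last.toList

-- ===== PRECONDITION & SPEC =====
-- Pre_ excludes exactly the inputs where the Python A raises an IndexError: empty
-- segments with a non-None idx (A indexes segments[0]; B likewise raises on
-- segments[-1]), and an empty first segment among 2+ segments with idx outside
-- [-len(str), len(str)] (cross_whitespaces then indexes past the string in both).
def Pre_str_equal (str : String) (segments : List String) (idx : Option Int) : Prop :=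
  (segments = [] → idx = none) ∧
  ∀ i, idx = some i → 2 ≤ segments.length → segments.head? = some "" →
    -(str.toList.length : Int) ≤ i ∧ i ≤ (str.toList.length : Int)
instance (str : String) (segments : List String) (idx : Option Int) : Decidable (Pre_str_equal str segments idx) := by unfold Pre_str_equal; infer_instance

def pvWitness_str_equal : String × List String × Option Int := ("a \tb", ["a", "b"], some 0)

def Spec_str_equal (str : String) (segments : List String) (idx : Option Int) (out : Bool) : Prop := out = str_equal_alt str segments idx
instance (str : String) (segments : List String) (idx : Option Int) (out : Bool) : Decidable (Spec_str_equal str segments idx out) := by unfold Spec_str_equal; infer_instance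

-- ===== CLAIM (what is proved, stated in full; the proofs are below) =====
def Claim_equal_str_equal : Prop := ∀ (str : String) (segments : List String) (idx : Option Int), Dom_str_equal str segments idx → Pre_str_equal str segments idx → Spec_str_equal str segments idx (str_equal str segments idx)

-- ===== LEMMAS AND PROOFS =====

-- the two ports agree on every input (even outside Pre_, where both Pythons raise)
theorem str_equal_eq_alt (segments : List String) (str : String) (idx : Option Int) :
    str_equal str segments idx = str_equal_alt str segments idx := by
  induction segments generalizing idx with
  | nil =>
    cases idx <;> simp [str_equal, str_equal_alt, bLoop]
  | cons seg rest ih =>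
    cases rest with
    | nil =>
      cases idx <;> simp [str_equal, str_equal_alt, bLoop]
    | cons r rs =>
      cases idx with
      | none => simp [str_equal, str_equal_alt, bLoop]
      | some i =>
        by_cases hm : PySem.List.slice str.toList (some i)
            (some (i + (seg.length : Int))) = seg.toList
        · have := ih (crossWhitespaces str.toList (i + (seg.length : Int) - 1))
          simp [str_equal, str_equal_alt, bLoop, hm] at this ⊢
          exact this
        · simp [str_equal, str_equal_alt, bLoop, hm]

-- ===== VERDICT (by name: the statement is the Claim_ definition above) =====
theorem str_equal_spec : Claim_equal_str_equal := by
  intro str segments idx _ _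
  unfold Spec_str_equal
  exact str_equal_eq_alt segments str idx
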